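-- pv_equiv track=rewrite | github.com/MatiasEmmanuelPerez/python2025Actividad2 | src/funciones.py | limpiar_datos
-- ===== SOURCE A (Python) =====
-- def limpiar_datos(clients):
--     clientes_limpios = []
--
--     for cliente in clients:
--         if cliente:  # si hay valores vacíos o nulos
--             cliente = cliente.strip()  # Elimina espacios extras(al principio y al final)
--             if cliente:  # Si no queda vacío después de los espacios
--                 cliente = cliente.title()  # Convertierte a formato de título (primera letra en mayúscula y el resto en minúscula).
--                 clientes_limpios.append(cliente)
--
--     # Eliminar registros duplicados
--     clientes_limpios = list(set(clientes_limpios))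
--
--     # Ordenar los clientes por nombre
--     clientes_limpios.sort()
--
--     return clientes_limpios
-- ===== SOURCE B (Python) =====
-- def limpiar_datos(clients):
--     # Sort-then-adjacent-dedup instead of hash-set dedup; cleaning via a comprehension.
--     limpios = sorted(c.strip().title() for c in clients if c and c.strip())
--     resultado = []
--     prev = None
--     for c in limpios:
--         if c != prev:
--             resultado.append(c)
--             prev = c
--     return resultado
-- ===== Notes on version B (the rewrite author's own statement) =====
-- stated objective: alternative
-- what changed: B replaces A's hash-set deduplication (list(set(...)) then sort) by sorting the cleaned list first and removing duplicates in one adjacent-comparison pass with a prev accumulator, and builds the cleaned list with a comprehension instead of an append loop.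
import Mathlib
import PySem

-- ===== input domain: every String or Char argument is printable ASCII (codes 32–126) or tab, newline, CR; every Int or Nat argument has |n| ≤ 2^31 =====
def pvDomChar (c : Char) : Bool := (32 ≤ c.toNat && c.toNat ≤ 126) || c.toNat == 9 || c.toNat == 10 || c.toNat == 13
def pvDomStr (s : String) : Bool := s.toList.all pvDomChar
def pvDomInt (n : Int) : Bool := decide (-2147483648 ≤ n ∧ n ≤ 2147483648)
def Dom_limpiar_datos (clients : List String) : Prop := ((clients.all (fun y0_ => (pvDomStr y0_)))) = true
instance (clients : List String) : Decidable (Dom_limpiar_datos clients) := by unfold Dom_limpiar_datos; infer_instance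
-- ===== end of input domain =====

-- B deduplicates by sorting first and skipping adjacent equals (no set), instead of A's
-- hash-set dedup followed by sort; same return value, similar cost (objective: alternative).

-- shared helper: Python str.title(), exact on ASCII (cased char = ASCII letter;
-- a letter is uppercased after a non-letter, lowercased after a letter)
def pyTitleChars : List Char → Bool → List Char
  | [], _ => []
  | c :: t, prevAlpha =>
      (if c.isAlpha then (if prevAlpha then c.toLower else c.toUpper) else c)
        :: pyTitleChars t c.isAlpha

def pyTitle (s : String) : String := String.ofList (pyTitleChars s.toList false)

-- ===== PORT A =====
def limpiar_datos (clients : List String) : List String :=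
  let clientes_limpios := clients.foldl (fun acc cliente =>
    if cliente ≠ "" then
      let cliente' := PySem.Str.strip cliente
      if cliente' ≠ "" then acc ++ [pyTitle cliente'] else acc
    else acc) []
  -- clientes_limpios = list(set(clientes_limpios)); clientes_limpios.sort()
  PySem.List.sorted (PySem.Set.ofList clientes_limpios) (fun x => x) false

-- ===== PORT B =====
def limpiar_datos_alt (clients : List String) : List String :=
  let limpios := PySem.List.sorted
    ((clients.filter (fun c => c ≠ "" && PySem.Str.strip c ≠ "")).map
      (fun c => pyTitle (PySem.Str.strip c))) (fun x => x) false
  (limpios.foldl (fun (st : List String × Option String) c =>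
      if some c ≠ st.2 then (st.1 ++ [c], some c) else st) ([], none)).1

-- ===== PRECONDITION & SPEC =====
def Spec_limpiar_datos (clients : List String) (out : List String) : Prop := out = limpiar_datos_alt clients
instance (clients : List String) (out : List String) : Decidable (Spec_limpiar_datos clients out) := by unfold Spec_limpiar_datos; infer_instance

-- ===== CLAIM (what is proved, stated in full; the proofs are below) =====
def Claim_equal_limpiar_datos : Prop := ∀ (clients : List String), Dom_limpiar_datos clients → Spec_limpiar_datos clients (limpiar_datos clients)

-- ===== LEMMAS AND PROOFS =====

-- recursive reading of B's adjacent-dedup loop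
def dedupAdj : List String → Option String → List String
  | [], _ => []
  | c :: t, prev => if some c = prev then dedupAdj t prev else c :: dedupAdj t (some c)

theorem foldl_dedupAdj (l : List String) (res : List String) (prev : Option String) :
    (l.foldl (fun (st : List String × Option String) c =>
      if some c ≠ st.2 then (st.1 ++ [c], some c) else st) (res, prev)).1
      = res ++ dedupAdj l prev := by
  induction l generalizing res prev with
  | nil => simp [dedupAdj]
  | cons c t ih =>
      rw [List.foldl_cons]
      by_cases h : some c = prev
      · rw [if_neg (not_not_intro h), ih]
        simp [dedupAdj, h]
      · rw [if_pos h, ih]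
        simp [dedupAdj, h]

theorem mem_dedupAdj_some (l : List String) (p : String)
    (h : (p :: l).Pairwise (· ≤ ·)) (x : String) :
    x ∈ dedupAdj l (some p) ↔ x ∈ l ∧ x ≠ p := by
  induction l generalizing p with
  | nil => simp [dedupAdj]
  | cons c t ih =>
      rcases List.pairwise_cons.1 h with ⟨hp, hct⟩
      have hpc : p ≤ c := hp c (List.mem_cons_self ..)
      by_cases hcp : c = p
      · subst hcp
        rw [show dedupAdj (c :: t) (some c) = dedupAdj t (some c) by simp [dedupAdj]]
        rw [ih c hct]
        constructor
        · rintro ⟨hx, hne⟩; exact ⟨List.mem_cons_of_mem _ hx, hne⟩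
        · rintro ⟨hx, hne⟩
          rcases List.mem_cons.1 hx with h1 | h1
          · exact absurd h1 hne
          · exact ⟨h1, hne⟩
      · rw [show dedupAdj (c :: t) (some p) = c :: dedupAdj t (some c) by simp [dedupAdj, hcp]]
        rw [List.mem_cons, ih c hct]
        constructor
        · rintro (rfl | ⟨hx, hne⟩)
          · exact ⟨List.mem_cons_self .., fun h' => hcp h'⟩
          · refine ⟨List.mem_cons_of_mem _ hx, ?_⟩
            rintro rfl
            rcases List.pairwise_cons.1 hct with ⟨hc, _⟩
            exact hcp (le_antisymm (hc x hx) hpc)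
        · rintro ⟨hx, hnep⟩
          rcases List.mem_cons.1 hx with rfl | h1
          · exact Or.inl rfl
          · by_cases hxc : x = c
            · exact Or.inl hxc
            · exact Or.inr ⟨h1, hxc⟩

theorem pairwise_dedupAdj_some (l : List String) (p : String)
    (h : (p :: l).Pairwise (· ≤ ·)) :
    (dedupAdj l (some p)).Pairwise (· < ·) := by
  induction l generalizing p with
  | nil => simp [dedupAdj]
  | cons c t ih =>
      rcases List.pairwise_cons.1 h with ⟨hp, hct⟩
      by_cases hcp : c = p
      · subst hcp
        rw [show dedupAdj (c :: t) (some c) = dedupAdj t (some c) by simp [dedupAdj]]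
        exact ih c hct
      · rw [show dedupAdj (c :: t) (some p) = c :: dedupAdj t (some c) by simp [dedupAdj, hcp]]
        refine List.pairwise_cons.2 ⟨?_, ih c hct⟩
        intro y hy
        rcases (mem_dedupAdj_some t c hct y).1 hy with ⟨hyt, hyc⟩
        rcases List.pairwise_cons.1 hct with ⟨hc, _⟩
        exact lt_of_le_of_ne (hc y hyt) (fun h' => hyc h'.symm)

theorem dedupAdj_mem_pairwise (l : List String) (h : l.Pairwise (· ≤ ·)) :
    (∀ x, x ∈ dedupAdj l none ↔ x ∈ l) ∧ (dedupAdj l none).Pairwise (· < ·) := by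
  cases l with
  | nil => simp [dedupAdj]
  | cons c t =>
      rw [show dedupAdj (c :: t) none = c :: dedupAdj t (some c) by simp [dedupAdj]]
      constructor
      · intro x
        rw [List.mem_cons, List.mem_cons, mem_dedupAdj_some t c h x]
        constructor
        · rintro (rfl | ⟨hx, _⟩)
          · exact Or.inl rfl
          · exact Or.inr hx
        · rintro (rfl | hx)
          · exact Or.inl rfl
          · by_cases hxc : x = c
            · exact Or.inl hxc
            · exact Or.inr ⟨hx, hxc⟩
      · refine List.pairwise_cons.2 ⟨?_, pairwise_dedupAdj_some t c h⟩
        intro y hy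
        rcases (mem_dedupAdj_some t c h y).1 hy with ⟨hyt, hyc⟩
        rcases List.pairwise_cons.1 h with ⟨hc, _⟩
        exact lt_of_le_of_ne (hc y hyt) (fun h' => hyc h'.symm)

-- A's cleaning foldl builds exactly B's filter+map list
theorem cleaning_eq (clients : List String) (acc : List String) :
    clients.foldl (fun acc cliente =>
      if cliente ≠ "" then
        let cliente' := PySem.Str.strip cliente
        if cliente' ≠ "" then acc ++ [pyTitle cliente'] else acc
      else acc) acc
    = acc ++ (clients.filter (fun c => c ≠ "" && PySem.Str.strip c ≠ "")).map
        (fun c => pyTitle (PySem.Str.strip c)) := by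
  induction clients generalizing acc with
  | nil => simp
  | cons c t ih =>
      rw [List.foldl_cons, ih]
      by_cases h1 : c = ""
      · simp [h1]
      · by_cases h2 : PySem.Str.strip c = ""
        · simp [h1, h2]
        · simp [h1, h2]

-- the key fact: sorted(set(L)) = adjacent-dedup of sorted(L)
theorem sorted_set_eq_dedupAdj (L : List String) :
    PySem.List.sorted (PySem.Set.ofList L) (fun x => x) false
      = dedupAdj (PySem.List.sorted L (fun x => x) false) none := by
  set ys := PySem.List.sorted L (fun x => x) false with hys
  have hys_pw : ys.Pairwise (· ≤ ·) := by
    simpa using PySem.List.sorted_pairwise (xs := L) (key := fun x => x)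
  obtain ⟨hmem, hpw⟩ := dedupAdj_mem_pairwise ys hys_pw
  have hA_pw : (PySem.List.sorted (PySem.Set.ofList L) (fun x => x) false).Pairwise (· < ·) :=
    PySem.List.sorted_ofList_pairwise_lt L
  have hA_mem : ∀ x, x ∈ PySem.List.sorted (PySem.Set.ofList L) (fun x => x) false ↔ x ∈ L := by
    intro x
    rw [PySem.List.mem_sorted]
    exact PySem.Set.mem_ofList L x
  have hmemL : ∀ x, x ∈ dedupAdj ys none ↔ x ∈ L := by
    intro x; rw [hmem x, hys, PySem.List.mem_sorted]
  have hnd1 : (PySem.List.sorted (PySem.Set.ofList L) (fun x => x) false).Nodup :=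
    hA_pw.nodup
  have hnd2 : (dedupAdj ys none).Nodup := hpw.nodup
  have hperm : (PySem.List.sorted (PySem.Set.ofList L) (fun x => x) false).Perm (dedupAdj ys none) := by
    rw [List.perm_ext_iff_of_nodup hnd1 hnd2]
    intro a; rw [hA_mem a, hmemL a]
  exact hperm.eq_of_pairwise (fun a b _ _ h1 h2 => absurd h1 (lt_asymm h2)) hA_pw hpw

-- ===== VERDICT (by name: the statement is the Claim_ definition above) =====
theorem limpiar_datos_spec : Claim_equal_limpiar_datos := by
  intro clients _
  unfold Spec_limpiar_datos limpiar_datos limpiar_datos_alt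
  rw [cleaning_eq clients [], foldl_dedupAdj, List.nil_append, List.nil_append]
  exact sorted_set_eq_dedupAdj _
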